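-- pv_equiv track=rewrite | github.com/lyrisk216/realthinkProject | 中B项目_GunShip/RT Lesson 高精度计算 V0.9.py | RT_num_init
-- ===== SOURCE A (Python) =====
-- PRECISION = 100
--
-- def RT_num_init(nStr):
--     n = 0
--     nPointPos = 0
--     nList = [0] * PRECISION
--     for i in range(len(nStr)):
--         if nStr[len(nStr) - i - 1] == '.':
--             nPointPos = i                       #记录小数点位置
--         else:
--             nList[n] = ord(nStr[len(nStr) - i - 1]) - 48            #将整数部分加入list
--             n += 1
--     return nList, nPointPos
-- ===== SOURCE B (Python) =====
-- PRECISION = 100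
--
-- def RT_num_init(nStr):
--     parts = nStr.split('.')
--     nPointPos = len(nStr) - len(parts[0]) - 1 if len(parts) > 1 else 0
--     forward = [ord(c) - 48 for c in ''.join(parts)]
--     forward.reverse()
--     return forward + [0] * (PRECISION - len(forward)), nPointPos
-- ===== Notes on version B (the rewrite author's own statement) =====
-- stated objective: alternative
-- what changed: Replaces A's single reverse indexed scan with an in-loop dot branch, mutable counter and fixed-array writes by a staged split-based pipeline: split the string at the dot separator, take the decimal position from the first part's length, join the parts, map to digits in a forward pass, reverse, and pad.
import Mathlib
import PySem

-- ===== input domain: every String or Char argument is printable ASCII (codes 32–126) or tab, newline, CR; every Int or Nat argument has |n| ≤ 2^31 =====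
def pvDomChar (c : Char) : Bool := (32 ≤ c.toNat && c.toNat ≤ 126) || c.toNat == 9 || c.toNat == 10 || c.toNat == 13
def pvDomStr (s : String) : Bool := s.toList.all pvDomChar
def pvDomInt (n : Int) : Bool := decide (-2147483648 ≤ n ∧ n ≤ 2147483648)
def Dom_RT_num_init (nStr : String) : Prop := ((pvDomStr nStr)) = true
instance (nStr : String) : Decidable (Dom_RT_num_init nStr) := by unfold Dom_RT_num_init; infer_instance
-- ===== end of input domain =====

-- B replaces A's reverse indexed scan (dot branch, counter, array writes) by a staged
-- split('.')-based pipeline: point position from the first part, join, map, reverse, pad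
-- (objective: alternative).

-- ===== PORT A =====
def RT_num_init (nStr : String) : List Int × Int :=
  let s := nStr.toList
  let len : Int := PySem.Str.len nStr
  let st := (PySem.List.pyRange 0 len 1).foldl
    (fun (st : Int × Int × List Int) i =>
      let n := st.1
      let nPointPos := st.2.1
      let nList := st.2.2
      let c := PySem.List.pyGetD s (len - i - 1) ' '
      if c = '.' then (n, i, nList)
      else (n + 1, nPointPos, PySem.List.pySetD nList n ((c.toNat : Int) - 48)))
    (0, 0, List.replicate 100 (0 : Int))
  (st.2.2, st.2.1)

-- ===== PORT B =====
def RT_num_init_alt (nStr : String) : List Int × Int :=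
  let parts := PySem.Chars.splitOn nStr.toList ['.']          -- nStr.split('.')
  let nPointPos : Int :=
    if 1 < parts.length then
      PySem.Str.len nStr - ((parts.headD []).length : Int) - 1   -- parts[0] (split is never empty)
    else 0
  let forward := (PySem.Chars.join [] parts).map (fun c => (c.toNat : Int) - 48)  -- ''.join(parts)
  let digits := forward.reverse
  (digits ++ List.replicate (100 - digits.length) 0, nPointPos)

-- ===== PRECONDITION & SPEC =====
-- Pre_ excludes exactly the strings with more than 100 non-dot characters, on which A raises IndexError.
def Pre_RT_num_init (nStr : String) : Prop :=
  (nStr.toList.filter (fun c => c ≠ '.')).length ≤ 100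
instance (nStr : String) : Decidable (Pre_RT_num_init nStr) := by unfold Pre_RT_num_init; infer_instance
def pvWitness_RT_num_init : String := "3.14"
def Spec_RT_num_init (nStr : String) (out : List Int × Int) : Prop := out = RT_num_init_alt nStr
instance (nStr : String) (out : List Int × Int) : Decidable (Spec_RT_num_init nStr out) := by unfold Spec_RT_num_init; infer_instance

-- ===== CLAIM (what is proved, stated in full; the proofs are below) =====
def Claim_equal_RT_num_init : Prop := ∀ (nStr : String), Dom_RT_num_init nStr → Pre_RT_num_init nStr → Spec_RT_num_init nStr (RT_num_init nStr)

-- ===== LEMMAS AND PROOFS =====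

-- index (from the head) of the LAST '.' in a list, if any
def lastDot : List Char → Option Nat
  | [] => none
  | c :: t =>
    match lastDot t with
    | some j => some (j + 1)
    | none => if c = '.' then some 0 else none

-- index of the FIRST '.' in a list, if any
def firstDot : List Char → Option Nat
  | [] => none
  | c :: t => if c = '.' then some 0 else (firstDot t).map (· + 1)

theorem lastDot_append_singleton (u : List Char) (c : Char) :
    lastDot (u ++ [c]) = if c = '.' then some u.length else lastDot u := by
  induction u with
  | nil => simp [lastDot]
  | cons a u ih =>
    simp only [List.cons_append, lastDot, ih]
    split_ifs <;> simp [lastDot]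

theorem firstDot_lt_length (s : List Char) (j : Nat) (h : firstDot s = some j) : j < s.length := by
  induction s generalizing j with
  | nil => simp [firstDot] at h
  | cons c t ih =>
    simp only [firstDot] at h
    split_ifs at h with hc
    · simp only [Option.some.injEq] at h
      simp only [List.length_cons]
      omega
    · cases ht : firstDot t with
      | none => rw [ht] at h; simp at h
      | some k =>
        rw [ht] at h
        simp only [Option.map_some, Option.some.injEq] at h
        have := ih k ht
        simp only [List.length_cons]
        omega

theorem lastDot_reverse (s : List Char) :
    lastDot s.reverse = (firstDot s).map (fun j => s.length - 1 - j) := by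
  induction s with
  | nil => simp [lastDot, firstDot]
  | cons c t ih =>
    simp only [List.reverse_cons, lastDot_append_singleton, firstDot]
    split_ifs with hc
    · simp
    · rw [ih]
      cases ht : firstDot t with
      | none => simp
      | some j =>
        have hj := firstDot_lt_length t j ht
        simp only [Option.map_some]
        congr 1
        simp only [List.length_cons]
        omega

theorem firstDot_none_iff (s : List Char) : firstDot s = none ↔ '.' ∉ s := by
  induction s with
  | nil => simp [firstDot]
  | cons c t ih =>
    simp only [firstDot, List.mem_cons]
    split_ifs with hc
    · simp [hc]
    · rw [Option.map_eq_none_iff, ih]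
      constructor
      · rintro h (h1 | h2)
        · exact hc h1.symm
        · exact h h2
      · intro h h2; exact h (Or.inr h2)

-- ---- characterisation of Chars.splitOn on the single-char separator '.' ----

-- reference single-char split
def splitDot : List Char → List (List Char)
  | [] => [[]]
  | c :: t => if c = '.' then [] :: splitDot t
              else match splitDot t with
                   | p :: ps => (c :: p) :: ps
                   | [] => [[c]]

theorem splitDot_ne_nil (s : List Char) : splitDot s ≠ [] := by
  cases s with
  | nil => simp [splitDot]
  | cons c t =>
    simp only [splitDot]
    split_ifs
    · simp
    · cases h : splitDot t <;> simp

def consHead (x : List Char) : List (List Char) → List (List Char)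
  | [] => [x]
  | p :: ps => (x ++ p) :: ps

theorem go_spec (fuel : Nat) : ∀ (l cur : List Char) (acc : List (List Char)),
    l.length < fuel →
    PySem.Chars.splitOn.go ['.'] fuel l cur acc
      = acc.reverse ++ consHead cur.reverse (splitDot l) := by
  induction fuel with
  | zero => intro l cur acc h; omega
  | succ fuel ih =>
    intro l cur acc h
    cases l with
    | nil =>
      simp [PySem.Chars.splitOn.go, splitDot, consHead]
    | cons c rest =>
      rw [PySem.Chars.splitOn.go]
      by_cases hc : c = '.'
      · subst hc
        have hpre : (['.'] : List Char).isPrefixOf ('.' :: rest) = true := by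
          simp [List.isPrefixOf]
        simp only [hpre, if_true, List.length_cons, List.length_nil, List.drop_succ_cons,
          List.drop_zero]
        rw [ih rest [] (cur.reverse :: acc) (by simpa using Nat.lt_of_succ_lt_succ h)]
        simp only [splitDot, if_true, List.reverse_cons, List.reverse_nil, List.append_assoc]
        cases hs : splitDot rest with
        | nil => exact absurd hs (splitDot_ne_nil rest)
        | cons p ps => simp [consHead]
      · have hpre : (['.'] : List Char).isPrefixOf (c :: rest) = false := by
          have h1 : ('.' == c) = false := beq_eq_false_iff_ne.mpr (fun h => hc h.symm)
          simp [List.isPrefixOf, h1]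
        simp only [hpre, if_false, Bool.false_eq_true]
        rw [ih rest (c :: cur) acc (by simpa using Nat.lt_of_succ_lt_succ h)]
        simp only [splitDot, hc, if_false, List.reverse_cons]
        cases hs : splitDot rest with
        | nil => exact absurd hs (splitDot_ne_nil rest)
        | cons p ps => simp [consHead]

theorem splitOn_dot (s : List Char) :
    PySem.Chars.splitOn s ['.'] = splitDot s := by
  unfold PySem.Chars.splitOn
  rw [go_spec (s.length + 1) s [] [] (by omega)]
  cases hs : splitDot s with
  | nil => exact absurd hs (splitDot_ne_nil s)
  | cons p ps => simp [consHead]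

theorem flatten_splitDot (s : List Char) :
    (splitDot s).flatten = s.filter (fun c => c ≠ '.') := by
  induction s with
  | nil => simp [splitDot]
  | cons c t ih =>
    simp only [splitDot, List.filter_cons]
    by_cases hc : c = '.'
    · simp [hc, ih]
    · cases hs : splitDot t with
      | nil => exact absurd hs (splitDot_ne_nil t)
      | cons p ps =>
        rw [hs] at ih
        simp [hc, hs]
        simpa using ih

theorem length_splitDot_iff (s : List Char) :
    1 < (splitDot s).length ↔ '.' ∈ s := by
  induction s with
  | nil => simp [splitDot]
  | cons c t ih =>
    simp only [splitDot, List.mem_cons]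
    by_cases hc : c = '.'
    · subst hc
      have hpos := List.length_pos_iff.mpr (splitDot_ne_nil t)
      simp
      omega
    · cases hs : splitDot t with
      | nil => exact absurd hs (splitDot_ne_nil t)
      | cons p ps =>
        rw [hs] at ih
        simp only [hc, if_false, List.length_cons] at ih ⊢
        rw [ih]
        constructor
        · exact Or.inr
        · rintro (h | h)
          · exact absurd h.symm hc
          · exact h

theorem head_splitDot (s : List Char) (j : Nat) (h : firstDot s = some j) :
    ((splitDot s).headD []).length = j := by
  induction s generalizing j with
  | nil => simp [firstDot] at h
  | cons c t ih =>
    simp only [firstDot] at h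
    by_cases hc : c = '.'
    · rw [if_pos hc] at h
      cases h
      simp [splitDot, hc]
    · rw [if_neg hc] at h
      cases ht : firstDot t with
      | none => rw [ht] at h; simp at h
      | some k =>
        rw [ht] at h
        simp only [Option.map_some, Option.some.injEq] at h
        subst h
        cases hs : splitDot t with
        | nil => exact absurd hs (splitDot_ne_nil t)
        | cons p ps =>
          have := ih k ht
          rw [hs] at this
          simp only [List.headD_cons] at this
          simp [splitDot, hc, hs, this]

theorem join_nil_eq_flatten (ps : List (List Char)) :
    PySem.Chars.join [] ps = ps.flatten := by
  induction ps with
  | nil => simp [PySem.Chars.join_nil]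
  | cons p qs ih =>
    cases qs with
    | nil => simp [PySem.Chars.join_singleton]
    | cons q rest =>
      rw [PySem.Chars.join_cons_cons, ih]
      simp

-- ---- A's loop characterised ----

def stepA (len : Int) (st : Int × Int × List Int) (ic : Int × Char) : Int × Int × List Int :=
  if ic.2 = '.' then (st.1, ic.1, st.2.2)
  else (st.1 + 1, st.2.1, PySem.List.pySetD st.2.2 st.1 ((ic.2.toNat : Int) - 48))

def digitsOf (r : List Char) : List Int :=
  (r.filter (fun c => c ≠ '.')).map (fun c => (c.toNat : Int) - 48)

def pointAcc (r : List Char) (k p : Int) : Int :=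
  match lastDot r with
  | none => p
  | some j => k + (j : Int)

theorem pointAcc_cons (c : Char) (t : List Char) (k p : Int) :
    pointAcc (c :: t) k p = pointAcc t (k + 1) (if c = '.' then k else p) := by
  simp only [pointAcc, lastDot]
  cases ht : lastDot t with
  | none => split_ifs <;> simp [pointAcc, ht]
  | some j => simp [pointAcc, ht]; push_cast; ring

theorem set_pad (d : List Int) (m : Nat) (v : Int) (hm : 0 < m) :
    (d ++ List.replicate m (0 : Int)).set d.length v = (d ++ [v]) ++ List.replicate (m - 1) 0 := by
  cases m with
  | zero => omega
  | succ m =>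
    rw [List.replicate_succ, List.set_append_right _ _ (le_refl _)]
    simp

theorem loop_spec (len : Int) (r : List Char) (k : Int) (p : Int) (d : List Int)
    (hlen : d.length + (r.filter (fun c => c ≠ '.')).length ≤ 100) :
    (PySem.List.enumerate r k).foldl (stepA len)
      ((d.length : Int), p, d ++ List.replicate (100 - d.length) 0)
    = (((d.length + (digitsOf r).length : Nat) : Int), pointAcc r k p,
       (d ++ digitsOf r) ++ List.replicate (100 - (d.length + (digitsOf r).length)) 0) := by
  induction r generalizing k p d with
  | nil => simp [PySem.List.enumerate_nil, digitsOf, pointAcc, lastDot]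
  | cons c t ih =>
    rw [PySem.List.enumerate_cons, List.foldl_cons]
    by_cases hc : c = '.'
    · have hstep : stepA len ((d.length : Int), p, d ++ List.replicate (100 - d.length) 0) (k, c)
          = ((d.length : Int), k, d ++ List.replicate (100 - d.length) 0) := by
        simp [stepA, hc]
      rw [hstep, ih (k + 1) k d (by simpa [hc] using hlen)]
      rw [pointAcc_cons]
      simp [hc, digitsOf]
    · have hd100 : d.length < 100 := by
        have h1 : (List.filter (fun x => decide ¬x = '.') (c :: t)).length ≥ 1 := by
          simp [List.filter_cons, hc]
        simp only [ne_eq] at hlen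
        omega
      have hstep : stepA len ((d.length : Int), p, d ++ List.replicate (100 - d.length) 0) (k, c)
          = (((d.length : Int)) + 1, p,
             (d ++ [(c.toNat : Int) - 48]) ++ List.replicate (100 - (d.length + 1)) 0) := by
        simp only [stepA, if_neg hc]
        rw [PySem.List.pySetD_natCast, set_pad d (100 - d.length) _ (by omega)]
        rw [Nat.sub_sub]
      rw [hstep]
      have hlen' : (d ++ [(c.toNat : Int) - 48]).length + (t.filter (fun x => x ≠ '.')).length ≤ 100 := by
        simp only [List.length_append, List.length_cons, List.length_nil]
        simp only [List.filter_cons, hc, ne_eq, decide_not] at hlen ⊢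
        simp [hc] at hlen
        omega
      have hrec := ih (k + 1) p (d ++ [(c.toNat : Int) - 48]) hlen'
      simp only [List.length_append, List.length_cons, List.length_nil] at hrec
      push_cast at hrec ⊢
      rw [hrec]
      simp only [Prod.mk.injEq]
      refine ⟨?_, ?_, ?_⟩
      · simp [digitsOf, List.filter_cons, hc]
        push_cast
        ring
      · rw [pointAcc_cons, if_neg hc]
      · simp only [digitsOf, List.filter_cons, hc, ne_eq, decide_not, decide_eq_true_eq,
          not_false_iff, if_pos, List.map_cons, List.append_assoc, List.singleton_append,
          List.length_cons, List.length_map]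
        simp only [decide_false, Bool.not_false, ite_true, List.map_cons, List.length_cons]
        congr 4
        omega

theorem rev_get (s : List Char) (j : Int) (h0 : 0 ≤ j) (h1 : j < (s.length : Int)) :
    PySem.List.pyGetD s ((s.length : Int) - j - 1) ' ' = PySem.List.pyGetD s.reverse j ' ' := by
  have hj : j.toNat < s.length := by omega
  rw [PySem.List.pyGetD_eq_getElem s ' ' (by omega) (by omega),
      PySem.List.pyGetD_eq_getElem s.reverse ' ' h0 (by simpa using h1),
      List.getElem_reverse]
  have : ((s.length : Int) - j - 1).toNat = s.length - 1 - j.toNat := by omega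
  simp [this]

theorem foldA_eq (s : List Char) (init : Int × Int × List Int) :
    (PySem.List.pyRange 0 (s.length : Int) 1).foldl
      (fun (st : Int × Int × List Int) i =>
        let c := PySem.List.pyGetD s ((s.length : Int) - i - 1) ' '
        if c = '.' then (st.1, i, st.2.2)
        else (st.1 + 1, st.2.1, PySem.List.pySetD st.2.2 st.1 ((c.toNat : Int) - 48)))
      init
    = (PySem.List.enumerate s.reverse 0).foldl (stepA (s.length : Int)) init := by
  rw [PySem.List.enumerate_eq_map_pyRange s.reverse ' ', List.foldl_map]
  simp only [PySem.List.len_eq, List.length_reverse]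
  apply PySem.List.foldl_congr_mem
  intro acc x hx
  have hb := (PySem.List.mem_pyRange_one).mp hx
  rw [rev_get s x hb.1 hb.2]
  rfl

-- the point position A accumulates equals B's split-based formula
theorem pointAcc_eq_alt (nStr : String) :
    pointAcc nStr.toList.reverse 0 0
      = (if 1 < (splitDot nStr.toList).length then
           (nStr.toList.length : Int) - (((splitDot nStr.toList).headD []).length : Int) - 1
         else 0) := by
  unfold pointAcc
  rw [lastDot_reverse]
  cases h : firstDot nStr.toList with
  | none =>
    have hmem := (firstDot_none_iff _).mp h
    rw [if_neg (fun hlt => hmem ((length_splitDot_iff _).mp hlt))]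
    simp
  | some j =>
    have hmem : '.' ∈ nStr.toList := by
      by_contra hm
      rw [(firstDot_none_iff _).mpr hm] at h
      cases h
    have hj := firstDot_lt_length _ _ h
    rw [if_pos ((length_splitDot_iff _).mpr hmem), head_splitDot _ j h]
    simp only [Option.map_some, List.length_reverse]
    omega

-- ===== VERDICT (by name: the statement is the Claim_ definition above) =====
theorem RT_num_init_spec : Claim_equal_RT_num_init := by
  unfold Claim_equal_RT_num_init
  intro nStr _ hpre
  unfold Spec_RT_num_init RT_num_init RT_num_init_alt
  simp only [PySem.Str.len_eq]
  rw [foldA_eq]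
  have hlen0 : ([] : List Int).length
      + (nStr.toList.reverse.filter (fun c => c ≠ '.')).length ≤ 100 := by
    unfold Pre_RT_num_init at hpre
    simpa [List.filter_reverse] using hpre
  have h := loop_spec (nStr.toList.length : Int) nStr.toList.reverse 0 0 [] hlen0
  simp only [List.length_nil, Nat.cast_zero, List.nil_append, Nat.sub_zero, Nat.zero_add] at h
  rw [h]
  rw [splitOn_dot, join_nil_eq_flatten, flatten_splitDot]
  rw [pointAcc_eq_alt nStr]
  simp [digitsOf, List.filter_reverse, List.map_reverse]
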